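-- pv_equiv track=rewrite | github.com/VoMinhKhoii/Nham | scripts/vtn_fct/extract_vtn_fct_2007.py | deduplicate_text
-- ===== SOURCE A (Python) =====
-- _DEDUP_BRIDGE = frozenset(' \t\n.')
--
-- def _is_doubled_run(text: str, start: int, length: int) -> bool:
--     """Check if chars at [start..start+length*2) are pair-doubled."""
--     end = start + length * 2
--     if end > len(text):
--         return False
--     for i in range(length):
--         if text[start + i * 2] != text[start + i * 2 + 1]:
--             return False
--     return True
--
-- def deduplicate_text(text: str) -> str:
--     """Collapse character-doubled regions in pdfplumber output.
--
--     Scans for runs where every character appears twice consecutively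
--     (e.g. "MMaaggiiêê ((MMaaggnneessiiuumm)) mmgg 3333")
--     and collapses them to single characters
--     ("Magiê (Magnesium) mg 33").
--
--     Uses a sliding-window heuristic: when 4+ consecutive char-pairs
--     are detected, we enter "doubled mode". In this mode:
--     - Doubled char-pairs → take one character
--     - Bridge chars (space, period) → keep as-is, stay in doubled mode
--       if the next non-bridge chars resume doubling
--     - Any other non-doubled char → exit doubled mode
--     """
--     if not text:
--         return text
--
--     result: list[str] = []
--     i = 0
--     n = len(text)
--     min_doubled_pairs = 4  # require 4 consecutive doubled chars to trigger
--     in_doubled = False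
--
--     while i < n:
--         if not in_doubled:
--             # Check for start of doubled region
--             if (
--                 i + min_doubled_pairs * 2 <= n
--                 and _is_doubled_run(text, i, min_doubled_pairs)
--             ):
--                 in_doubled = True
--                 # Don't advance i — re-process in doubled mode
--             else:
--                 result.append(text[i])
--                 i += 1
--         else:
--             # In doubled mode
--             if i + 1 < n and text[i] == text[i + 1]:
--                 # Doubled pair — take one character
--                 result.append(text[i])
--                 i += 2
--             elif text[i] in _DEDUP_BRIDGE:
--                 # Bridge character (space, period) — keep it, but
--                 # only stay in doubled mode if doubling resumes
--                 result.append(text[i])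
--                 i += 1
--                 # Peek ahead past any bridge chars
--                 j = i
--                 while j < n and text[j] in _DEDUP_BRIDGE:
--                     j += 1
--                 if j + 1 < n and text[j] == text[j + 1]:
--                     pass  # doubling resumes — stay in doubled mode
--                 else:
--                     in_doubled = False  # doubling ended
--             else:
--                 # Non-doubled, non-bridge char — exit doubled mode
--                 in_doubled = False
--                 result.append(text[i])
--                 i += 1
--
--     return ''.join(result)
-- ===== SOURCE B (Python) =====
-- _DEDUP_BRIDGE = frozenset(' \t\n.')
--
-- def deduplicate_text(text: str) -> str:
--     """Collapse char-doubled regions: table-driven block emitter.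
--
--     Two right-to-left precomputation passes build, for every index,
--     the end of the greedy doubled-pair chain (pe) and the next
--     non-bridge index (nb); the emitter then copies whole blocks,
--     halving each chain with one strided slice, with no re-scanning.
--     """
--     n = len(text)
--     # nb[i] = first index j >= i with text[j] not a bridge char (n if none)
--     nb = [n] * (n + 1)
--     for i in range(n - 1, -1, -1):
--         nb[i] = nb[i + 1] if text[i] in _DEDUP_BRIDGE else i
--     # pe[i] = end of the doubled-pair chain starting at i
--     pe = list(range(n + 2))
--     for i in range(n - 2, -1, -1):
--         if text[i] == text[i + 1]:
--             pe[i] = pe[i + 2]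
--     out = []
--     i = 0
--     while i < n:
--         if pe[i] - i >= 8:  # 4+ doubled pairs: a doubled region starts here
--             while True:
--                 e = pe[i]
--                 out.append(text[i:e:2])  # halve the whole chain at once
--                 i = e
--                 if i >= n:
--                     break
--                 out.append(text[i])
--                 i += 1
--                 if text[e] not in _DEDUP_BRIDGE:
--                     break
--                 j = nb[i]
--                 if not (j + 1 < n and text[j] == text[j + 1]):
--                     break
--         else:
--             out.append(text[i])
--             i += 1
--     return ''.join(out)
-- ===== Notes on version B (the rewrite author's own statement) =====
-- stated objective: faster
-- what changed: B replaces A's flag-driven per-character state machine by a table-driven block emitter: two right-to-left precomputation passes build a next-non-bridge index table and a doubled-pair-chain-end table, and the emitter then copies whole blocks, halving each chain with one strided slice, so neither the 4-pair trigger re-check nor the bridge-run peek loop re-scans any character.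
import Mathlib
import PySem

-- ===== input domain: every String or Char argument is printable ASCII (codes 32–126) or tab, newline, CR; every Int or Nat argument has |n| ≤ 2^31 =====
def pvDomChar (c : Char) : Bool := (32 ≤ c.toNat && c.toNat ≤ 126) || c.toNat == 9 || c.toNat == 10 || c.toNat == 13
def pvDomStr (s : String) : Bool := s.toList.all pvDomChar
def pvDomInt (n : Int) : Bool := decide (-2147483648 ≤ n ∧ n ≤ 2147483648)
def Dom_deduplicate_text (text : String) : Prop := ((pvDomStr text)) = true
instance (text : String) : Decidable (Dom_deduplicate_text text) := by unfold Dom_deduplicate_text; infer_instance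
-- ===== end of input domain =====

-- ===== PORT A =====
-- B replaces A's flag-driven per-character state machine by a table-driven block emitter
-- (two right-to-left precomputation passes + whole-block copying); equal return value (alternative).
-- While-loops are ported as structural recursion on a fuel argument initialised to a provably sufficient bound.
-- shared helpers: the bridge-set membership test and string indexing (both Pythons use them)
def pvBridge (c : Char) : Bool := c = ' ' || c = '\t' || c = '\n' || c = '.'

def chAt (xs : List Char) (i : Nat) : Char := xs.getD i ' '

-- A's `while j < n and text[j] in _DEDUP_BRIDGE: j += 1` (fueled; j never exceeds len, so len+1 steps always suffice)
def pvPeekF (xs : List Char) : Nat → Nat → Nat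
  | 0, j => j
  | f+1, j => if j < xs.length && pvBridge (chAt xs j) then pvPeekF xs f (j+1) else j

def pvPeek (xs : List Char) (j : Nat) : Nat := pvPeekF xs (xs.length + 1) j

-- A's _is_doubled_run (length generic, as in the Python)
def isDoubledRun (xs : List Char) (start len : Nat) : Bool :=
  if start + len * 2 > xs.length then false
  else (List.range len).all (fun i => chAt xs (start + i * 2) = chAt xs (start + i * 2 + 1))

-- A's while-loop: state (i, in_doubled, result); one fuel unit per iteration
def loopA (xs : List Char) : Nat → Nat → Bool → List Char → List Char
  | 0, _, _, acc => acc
  | f+1, i, dbl, acc =>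
    if i < xs.length then
      if dbl = false then
        if i + 4 * 2 ≤ xs.length && isDoubledRun xs i 4 then
          loopA xs f i true acc
        else
          loopA xs f (i+1) false (acc ++ [chAt xs i])
      else
        if i + 1 < xs.length && chAt xs i = chAt xs (i+1) then
          loopA xs f (i+2) true (acc ++ [chAt xs i])
        else if pvBridge (chAt xs i) then
          let acc' := acc ++ [chAt xs i]
          let j := pvPeek xs (i+1)
          loopA xs f (i+1) (j + 1 < xs.length && chAt xs j = chAt xs (j+1)) acc'
        else
          loopA xs f (i+1) false (acc ++ [chAt xs i])
    else acc

def deduplicate_text (text : String) : String :=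
  if text = "" then text
  else String.mk (loopA text.toList (2 * text.toList.length + 1) 0 false [])

-- ===== PORT B =====
-- B's first backwards pass `nb[i] = nb[i+1] if text[i] in _DEDUP_BRIDGE else i`,
-- built back-to-front exactly as the Python fills the array: nbListAux k = [nb[n-k], …, nb[n]]
def nbListAux (xs : List Char) : Nat → List Nat
  | 0 => [xs.length]
  | k+1 =>
    let rest := nbListAux xs k
    let i := xs.length - (k+1)
    (if pvBridge (chAt xs i) then rest.headD xs.length else i) :: rest

def nbList (xs : List Char) : List Nat := nbListAux xs xs.length

-- B's second backwards pass `if text[i] == text[i+1]: pe[i] = pe[i+2]` over pe = [0..n+1];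
-- peListAux k = [pe[n+1-k], …, pe[n+1]]
def peListAux (xs : List Char) : Nat → List Nat
  | 0 => [xs.length + 1]
  | k+1 =>
    let rest := peListAux xs k
    let i := xs.length - k
    (if i + 1 < xs.length && chAt xs i = chAt xs (i+1) then rest.getD 1 (xs.length + 1) else i)
      :: rest

def peList (xs : List Char) : List Nat := peListAux xs (xs.length + 1)

-- Python slice text[i:e:2] (exact for 0 ≤ i, e ≤ len: chars at i, i+2, … below e)
def stride2 (xs : List Char) (i e : Nat) : List Char :=
  if h : i < e then chAt xs i :: stride2 xs (i+2) e else []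
termination_by e - i
decreasing_by omega

-- B's inner `while True` (the doubled-region block emitter); each pass advances i, so len+1 fuel suffices
def regionB (xs : List Char) (nb pe : List Nat) : Nat → Nat → List Char → Nat × List Char
  | 0, i, acc => (i, acc)
  | f+1, i, acc =>
    let e := pe.getD i 0
    let acc1 := acc ++ stride2 xs i e
    if xs.length ≤ e then (e, acc1)
    else
      let acc2 := acc1 ++ [chAt xs e]
      if !pvBridge (chAt xs e) then (e + 1, acc2)
      else
        let j := nb.getD (e + 1) xs.length
        if !(j + 1 < xs.length && chAt xs j = chAt xs (j+1)) then (e + 1, acc2)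
        else regionB xs nb pe f (e + 1) acc2

-- B's outer while-loop
def mainB (xs : List Char) (nb pe : List Nat) : Nat → Nat → List Char → List Char
  | 0, _, acc => acc
  | f+1, i, acc =>
    if i < xs.length then
      if 8 ≤ pe.getD i 0 - i then
        let r := regionB xs nb pe (xs.length + 1) i acc
        mainB xs nb pe f r.1 r.2
      else mainB xs nb pe f (i+1) (acc ++ [chAt xs i])
    else acc

def deduplicate_text_alt (text : String) : String :=
  String.mk (mainB text.toList (nbList text.toList) (peList text.toList)
    (text.toList.length + 1) 0 [])

-- ===== PRECONDITION & SPEC =====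
def Spec_deduplicate_text (text : String) (out : String) : Prop := out = deduplicate_text_alt text
instance (text : String) (out : String) : Decidable (Spec_deduplicate_text text out) := by unfold Spec_deduplicate_text; infer_instance

-- ===== CLAIM (what is proved, stated in full; the proofs are below) =====
def Claim_equal_deduplicate_text : Prop := ∀ (text : String), Dom_deduplicate_text text → Spec_deduplicate_text text (deduplicate_text text)

-- ===== LEMMAS AND PROOFS =====

-- the mathematical content of B's pe table: end of the greedy doubled-pair chain from i
def peFun (xs : List Char) (i : Nat) : Nat :=
  if h : i + 1 < xs.length ∧ chAt xs i = chAt xs (i+1) then peFun xs (i+2) else i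
termination_by xs.length - i
decreasing_by omega

theorem peFun_ge_aux (xs : List Char) : ∀ d i, xs.length - i ≤ d → i ≤ peFun xs i := by
  intro d
  induction d with
  | zero =>
    intro i h
    rw [peFun]
    split
    · omega
    · exact Nat.le_refl i
  | succ d ih =>
    intro i h
    rw [peFun]
    split
    · next hc => have := ih (i+2) (by omega); omega
    · exact Nat.le_refl i

theorem peFun_ge (xs : List Char) (i : Nat) : i ≤ peFun xs i :=
  peFun_ge_aux xs (xs.length - i) i (Nat.le_refl _)

theorem peFun_le_aux (xs : List Char) : ∀ d i, xs.length - i ≤ d → peFun xs i ≤ max i xs.length := by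
  intro d
  induction d with
  | zero =>
    intro i h
    rw [peFun]
    split
    · omega
    · omega
  | succ d ih =>
    intro i h
    rw [peFun]
    split
    · next hc => have := ih (i+2) (by omega); omega
    · omega

theorem peFun_le (xs : List Char) (i : Nat) : peFun xs i ≤ max i xs.length :=
  peFun_le_aux xs (xs.length - i) i (Nat.le_refl _)

theorem peFun_fix_aux (xs : List Char) : ∀ d i, xs.length - i ≤ d →
    ¬ (peFun xs i + 1 < xs.length ∧ chAt xs (peFun xs i) = chAt xs (peFun xs i + 1)) := by
  intro d
  induction d with
  | zero =>
    intro i h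
    rw [peFun]
    split
    · next hc => omega
    · next hc => exact hc
  | succ d ih =>
    intro i h
    rw [peFun]
    split
    · next hc => exact ih (i+2) (by omega)
    · next hc => exact hc

theorem peFun_fix (xs : List Char) (i : Nat) :
    ¬ (peFun xs i + 1 < xs.length ∧ chAt xs (peFun xs i) = chAt xs (peFun xs i + 1)) :=
  peFun_fix_aux xs (xs.length - i) i (Nat.le_refl _)

-- pvPeek basics (A's peek loop)
theorem peekF_of_ge (xs : List Char) (f j : Nat) (h : xs.length ≤ j) :
    pvPeekF xs f j = j := by
  cases f with
  | zero => rfl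
  | succ f => simp [pvPeekF, Nat.not_lt.mpr h]

theorem peekF_irrel (xs : List Char) : ∀ f1 f2 j,
    xs.length ≤ j + f1 → xs.length ≤ j + f2 → pvPeekF xs f1 j = pvPeekF xs f2 j := by
  intro f1
  induction f1 with
  | zero =>
    intro f2 j h1 h2
    rw [peekF_of_ge xs 0 j (by omega), peekF_of_ge xs f2 j (by omega)]
  | succ f1 ih =>
    intro f2 j h1 h2
    cases f2 with
    | zero =>
      rw [peekF_of_ge xs (f1+1) j (by omega), peekF_of_ge xs 0 j (by omega)]
    | succ f2 =>
      rw [pvPeekF, pvPeekF]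
      by_cases hc : (decide (j < xs.length) && pvBridge (chAt xs j)) = true
      · rw [if_pos hc, if_pos hc]
        exact ih f2 (j+1) (by omega) (by omega)
      · rw [if_neg hc, if_neg hc]

theorem pvPeek_cons (xs : List Char) (j : Nat) (h : j < xs.length)
    (hb : pvBridge (chAt xs j) = true) : pvPeek xs j = pvPeek xs (j+1) := by
  unfold pvPeek
  rw [pvPeekF, if_pos (by simp [h, hb])]
  exact peekF_irrel xs xs.length (xs.length+1) (j+1) (by omega) (by omega)

theorem pvPeek_stop (xs : List Char) (j : Nat)
    (h : (decide (j < xs.length) && pvBridge (chAt xs j)) = false) :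
    pvPeek xs j = j := by
  unfold pvPeek
  rw [pvPeekF, if_neg (by simp [h])]

-- B's nb table equals A's peek function
theorem nbListAux_len (xs : List Char) : ∀ k, (nbListAux xs k).length = k + 1 := by
  intro k
  induction k with
  | zero => rfl
  | succ k ih => simp [nbListAux, ih]

theorem nbListAux_getD (xs : List Char) : ∀ k, k ≤ xs.length → ∀ t, t ≤ k → ∀ d,
    (nbListAux xs k).getD t d = pvPeek xs (xs.length - k + t) := by
  intro k
  induction k with
  | zero =>
    intro _ t ht d
    interval_cases t
    simp [nbListAux, List.getD]
    exact (peekF_of_ge xs _ xs.length (Nat.le_refl _)).symm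
  | succ k ih =>
    intro hk t ht d
    cases t with
    | succ s =>
      simp only [nbListAux, List.getD_cons_succ]
      rw [ih (by omega) s (by omega) d]
      congr 1
      omega
    | zero =>
      simp only [nbListAux, List.getD_cons_zero]
      have hi : xs.length - (k+1) < xs.length := by omega
      have hrest : (nbListAux xs k).headD xs.length = pvPeek xs (xs.length - k) := by
        cases hcons : nbListAux xs k with
        | nil => have := nbListAux_len xs k; rw [hcons] at this; simp at this
        | cons a l =>
          have : (nbListAux xs k).getD 0 xs.length = pvPeek xs (xs.length - k + 0) :=
            ih (by omega) 0 (by omega) xs.length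
          rw [hcons] at this
          simpa using this
      by_cases hb : pvBridge (chAt xs (xs.length - (k+1))) = true
      · rw [if_pos hb, hrest]
        have h0 : xs.length - (k+1) + 0 = xs.length - (k+1) := by omega
        rw [h0, pvPeek_cons xs _ hi hb]
        congr 1
        omega
      · rw [if_neg hb, pvPeek_stop xs _ (by simp [Bool.not_eq_true _ |>.mp hb])]
        omega

theorem nbList_getD (xs : List Char) (i : Nat) (hi : i ≤ xs.length) (d : Nat) :
    (nbList xs).getD i d = pvPeek xs i := by
  have := nbListAux_getD xs xs.length (Nat.le_refl _) i hi d
  unfold nbList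
  rw [this]
  congr 1
  omega

-- B's pe table equals peFun
theorem peListAux_getD (xs : List Char) : ∀ k, k ≤ xs.length + 1 → ∀ t, t ≤ k → ∀ d,
    (peListAux xs k).getD t d = peFun xs (xs.length + 1 - k + t) := by
  intro k
  induction k with
  | zero =>
    intro _ t ht d
    interval_cases t
    simp only [peListAux, List.getD_cons_zero]
    rw [peFun]
    rw [dif_neg (by omega)]
    omega
  | succ k ih =>
    intro hk t ht d
    cases t with
    | succ s =>
      simp only [peListAux, List.getD_cons_succ]
      rw [ih (by omega) s (by omega) d]
      congr 1
      omega
    | zero =>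
      simp only [peListAux, List.getD_cons_zero]
      have hi : xs.length + 1 - (k+1) + 0 = xs.length - k := by omega
      rw [hi]
      by_cases hc : (xs.length - k) + 1 < xs.length ∧
          chAt xs (xs.length - k) = chAt xs (xs.length - k + 1)
      · rw [if_pos (by simp [hc.1, hc.2]), peFun, dif_pos hc]
        have hk1 : 1 ≤ k := by omega
        rw [ih (by omega) 1 (by omega) (xs.length + 1)]
        congr 1
        omega
      · rw [if_neg (by simpa using hc), peFun, dif_neg hc]

theorem peList_getD (xs : List Char) (i : Nat) (hi : i ≤ xs.length) (d : Nat) :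
    (peList xs).getD i d = peFun xs i := by
  have := peListAux_getD xs (xs.length + 1) (by omega) i (by omega) d
  unfold peList
  rw [this]
  congr 1
  omega

-- A's doubled-region trigger equals B's table test
theorem trigger_eq (xs : List Char) (i : Nat) :
    ((decide (i + 4 * 2 ≤ xs.length)) && isDoubledRun xs i 4) = decide (8 ≤ peFun xs i - i) := by
  by_cases h8 : i + 8 ≤ xs.length
  · rw [Bool.eq_iff_iff]
    unfold isDoubledRun
    rw [if_neg (by omega)]
    simp [show List.range 4 = [0,1,2,3] from rfl, h8]
    constructor
    · rintro ⟨e0, e1, e2, e3⟩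
      have p0 : peFun xs i = peFun xs (i+2) := by rw [peFun, dif_pos ⟨by omega, e0⟩]
      have p1 : peFun xs (i+2) = peFun xs (i+4) := by rw [peFun, dif_pos ⟨by omega, e1⟩]
      have p2 : peFun xs (i+4) = peFun xs (i+6) := by rw [peFun, dif_pos ⟨by omega, e2⟩]
      have p3 : peFun xs (i+6) = peFun xs (i+8) := by rw [peFun, dif_pos ⟨by omega, e3⟩]
      have hge := peFun_ge xs (i+8)
      omega
    · intro hpe
      by_cases e0 : chAt xs i = chAt xs (i+1)
      · have p0 : peFun xs i = peFun xs (i+2) := by rw [peFun, dif_pos ⟨by omega, e0⟩]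
        by_cases e1 : chAt xs (i+2) = chAt xs (i+2+1)
        · have p1 : peFun xs (i+2) = peFun xs (i+4) := by rw [peFun, dif_pos ⟨by omega, e1⟩]
          by_cases e2 : chAt xs (i+4) = chAt xs (i+4+1)
          · have p2 : peFun xs (i+4) = peFun xs (i+6) := by rw [peFun, dif_pos ⟨by omega, e2⟩]
            by_cases e3 : chAt xs (i+6) = chAt xs (i+6+1)
            · exact ⟨e0, e1, e2, e3⟩
            · have p3 : peFun xs (i+6) = i + 6 := by
                rw [peFun, dif_neg (by intro h; exact e3 h.2)]
              omega
          · have p2 : peFun xs (i+4) = i + 4 := by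
              rw [peFun, dif_neg (by intro h; exact e2 h.2)]
            omega
        · have p1 : peFun xs (i+2) = i + 2 := by
            rw [peFun, dif_neg (by intro h; exact e1 h.2)]
          omega
      · have p0 : peFun xs i = i := by
          rw [peFun, dif_neg (by intro h; exact e0 h.2)]
        omega
  · have hle := peFun_le xs i
    have hR : ¬ (8 ≤ peFun xs i - i) := by omega
    unfold isDoubledRun
    rw [if_pos (by omega)]
    simp [hR]

-- loopA fuel lemmas
theorem loopA_of_ge (xs : List Char) (f i : Nat) (dbl : Bool) (acc : List Char)
    (h : xs.length ≤ i) : loopA xs f i dbl acc = acc := by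
  cases f with
  | zero => rfl
  | succ f => simp [loopA, Nat.not_lt.mpr h]

theorem loopA_irrel (xs : List Char) : ∀ f1 f2 i dbl acc,
    2 * (xs.length - i) + (if dbl then 0 else 1) ≤ f1 →
    2 * (xs.length - i) + (if dbl then 0 else 1) ≤ f2 →
    loopA xs f1 i dbl acc = loopA xs f2 i dbl acc := by
  intro f1
  induction f1 with
  | zero =>
    intro f2 i dbl acc h1 h2
    cases dbl with
    | false => simp at h1
    | true =>
      have hge : xs.length ≤ i := by simp at h1; omega
      rw [loopA_of_ge xs 0 i true acc hge, loopA_of_ge xs f2 i true acc hge]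
  | succ f1 ih =>
    intro f2 i dbl acc h1 h2
    by_cases hin : i < xs.length
    · have hf2 : ∃ f2', f2 = f2' + 1 := by
        cases dbl <;> simp at h2 <;> exact ⟨f2 - 1, by omega⟩
      obtain ⟨f2', rfl⟩ := hf2
      rw [loopA, loopA]
      rw [if_pos hin, if_pos hin]
      cases dbl with
      | false =>
        rw [if_pos (show (false = false) from rfl), if_pos (show (false = false) from rfl)]
        by_cases ht : (decide (i + 4 * 2 ≤ xs.length) && isDoubledRun xs i 4) = true
        · rw [if_pos ht, if_pos ht]
          exact ih f2' i true acc (by simp at h1 ⊢; omega) (by simp at h2 ⊢; omega)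
        · rw [if_neg ht, if_neg ht]
          exact ih f2' (i+1) false (acc ++ [chAt xs i]) (by simp at h1 ⊢; omega) (by simp at h2 ⊢; omega)
      | true =>
        rw [if_neg (show ¬(true = false) from by simp), if_neg (show ¬(true = false) from by simp)]
        by_cases hp : (decide (i + 1 < xs.length) && decide (chAt xs i = chAt xs (i+1))) = true
        · rw [if_pos hp, if_pos hp]
          have hi1 : i + 1 < xs.length := by simpa using (Bool.and_eq_true _ _ |>.mp hp).1
          exact ih f2' (i+2) true (acc ++ [chAt xs i]) (by simp at h1 ⊢; omega) (by simp at h2 ⊢; omega)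
        · rw [if_neg hp, if_neg hp]
          by_cases hb : pvBridge (chAt xs i) = true
          · rw [if_pos hb, if_pos hb]
            refine ih f2' (i+1) _ _ ?_ ?_ <;>
              · have hle : (if (pvPeek xs (i+1) + 1 < xs.length && chAt xs (pvPeek xs (i+1)) = chAt xs (pvPeek xs (i+1) + 1) : Bool) = true then 0 else 1) ≤ 1 := by
                  split <;> omega
                simp at h1 h2
                omega
          · rw [if_neg hb, if_neg hb]
            exact ih f2' (i+1) false (acc ++ [chAt xs i]) (by simp at h1 ⊢; omega) (by simp at h2 ⊢; omega)
    · rw [loopA_of_ge xs _ i dbl acc (by omega), loopA_of_ge xs f2 i dbl acc (by omega)]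

-- A's doubled mode walks the pair chain [i, peFun i) exactly as B's one strided slice emits it
theorem chainWalk (xs : List Char) : ∀ d i acc f1 f2, peFun xs i - i ≤ d →
    2 * (xs.length - i) ≤ f1 → 2 * (xs.length - peFun xs i) ≤ f2 →
    loopA xs f1 i true acc = loopA xs f2 (peFun xs i) true (acc ++ stride2 xs i (peFun xs i)) := by
  intro d
  induction d with
  | zero =>
    intro i acc f1 f2 h1 hf1 hf2
    have hge := peFun_ge xs i
    have he : peFun xs i = i := by omega
    rw [he, stride2, dif_neg (by omega)]
    simp only [List.append_nil]
    exact loopA_irrel xs f1 f2 i true acc (by simp; omega) (by simp; omega)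
  | succ d ih =>
    intro i acc f1 f2 h1 hf1 hf2
    by_cases hc : i + 1 < xs.length ∧ chAt xs i = chAt xs (i+1)
    · have p0 : peFun xs i = peFun xs (i+2) := by rw [peFun, dif_pos hc]
      obtain ⟨f1', rfl⟩ : ∃ f1', f1 = f1' + 1 := ⟨f1 - 1, by omega⟩
      rw [loopA, if_pos (by omega), if_neg (by simp),
        if_pos (by simp [hc.1, hc.2])]
      have hlt : i < peFun xs i := by
        rw [p0]; have := peFun_ge xs (i+2); omega
      rw [stride2, dif_pos hlt]
      have harr : acc ++ chAt xs i :: stride2 xs (i+2) (peFun xs i)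
          = (acc ++ [chAt xs i]) ++ stride2 xs (i+2) (peFun xs i) := by simp
      rw [harr, p0]
      exact ih (i+2) (acc ++ [chAt xs i]) f1' f2 (by rw [← p0]; omega) (by omega)
        (by rw [← p0]; exact hf2)
    · have p0 : peFun xs i = i := by rw [peFun, dif_neg hc]
      rw [p0, stride2, dif_neg (by omega)]
      simp only [List.append_nil]
      exact loopA_irrel xs f1 f2 i true acc (by simp; omega) (by simp; omega)

-- mainB fuel lemma
theorem mainB_of_ge (xs : List Char) (nb pe : List Nat) (f i : Nat) (acc : List Char)
    (h : xs.length ≤ i) : mainB xs nb pe f i acc = acc := by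
  cases f with
  | zero => rfl
  | succ f => simp [mainB, Nat.not_lt.mpr h]

-- main simulation: A's single flag-driven loop equals B's table-driven block loops
theorem mainSim (xs : List Char) : ∀ K i acc,
    (2 * (xs.length - i) + 1 ≤ K → ∀ fa fo, 2 * (xs.length - i) + 1 ≤ fa →
      xs.length - i < fo →
      loopA xs fa i false acc = mainB xs (nbList xs) (peList xs) fo i acc) ∧
    (2 * (xs.length - i) ≤ K → i ≤ xs.length → ∀ fa fr fo, 2 * (xs.length - i) ≤ fa →
      xs.length - i < fr → xs.length - i ≤ fo →
      loopA xs fa i true acc =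
        mainB xs (nbList xs) (peList xs) fo
          (regionB xs (nbList xs) (peList xs) fr i acc).1
          (regionB xs (nbList xs) (peList xs) fr i acc).2) := by
  intro K
  induction K with
  | zero =>
    intro i acc
    constructor
    · omega
    · intro hK hin fa fr fo hfa hfr hfo
      have hge : xs.length ≤ i := by omega
      have he : i = xs.length := by omega
      obtain ⟨fr', rfl⟩ : ∃ fr', fr = fr' + 1 := ⟨fr - 1, by omega⟩
      rw [loopA_of_ge xs fa i true acc hge]
      have hpe : (peList xs).getD i 0 = peFun xs i := peList_getD xs i (by omega) 0
      have hfix : peFun xs i = i := by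
        rw [peFun, dif_neg (by omega)]
      have hreg : regionB xs (nbList xs) (peList xs) (fr'+1) i acc = (i, acc) := by
        simp only [regionB, hpe, hfix]
        rw [stride2, dif_neg (by omega)]
        simp [hge]
      rw [hreg]
      rw [mainB_of_ge xs _ _ fo i acc hge]
  | succ K ih =>
    intro i acc
    constructor
    · -- normal mode
      intro hK fa fo hfa hfo
      by_cases hin : i < xs.length
      · obtain ⟨fa', rfl⟩ : ∃ fa', fa = fa' + 1 := ⟨fa - 1, by omega⟩
        obtain ⟨fo', rfl⟩ : ∃ fo', fo = fo' + 1 := ⟨fo - 1, by omega⟩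
        rw [loopA, if_pos hin, if_pos rfl]
        simp only [mainB, if_pos hin]
        have hpe : (peList xs).getD i 0 = peFun xs i := peList_getD xs i (by omega) 0
        rw [hpe, trigger_eq]
        by_cases ht : 8 ≤ peFun xs i - i
        · rw [if_pos (by simpa using ht), if_pos ht]
          exact (ih i acc).2 (by omega) (by omega) fa' (xs.length + 1) fo'
            (by omega) (by omega) (by omega)
        · rw [if_neg (by simpa using ht), if_neg ht]
          exact (ih (i+1) (acc ++ [chAt xs i])).1 (by omega) fa' fo' (by omega) (by omega)
      · rw [loopA_of_ge xs fa i false acc (by omega),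
          mainB_of_ge xs _ _ fo i acc (by omega)]
    · -- doubled mode
      intro hK hile fa fr fo hfa hfr hfo
      obtain ⟨fr', rfl⟩ : ∃ fr', fr = fr' + 1 := ⟨fr - 1, by omega⟩
      have hpe : (peList xs).getD i 0 = peFun xs i := peList_getD xs i hile 0
      set e := peFun xs i with hedef
      have hie : i ≤ e := peFun_ge xs i
      have hele : e ≤ xs.length := by have := peFun_le xs i; omega
      have hwalk := chainWalk xs (e - i) i acc fa fa (by omega) (by omega) (by omega)
      rw [← hedef] at hwalk
      rw [hwalk]
      by_cases hen : xs.length ≤ e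
      · have hreg : regionB xs (nbList xs) (peList xs) (fr'+1) i acc
            = (e, acc ++ stride2 xs i e) := by
          simp only [regionB, hpe]
          simp [hen]
        rw [hreg]
        rw [loopA_of_ge xs fa e true _ hen]
        rw [mainB_of_ge xs _ _ fo e _ hen]
      · have hfx := peFun_fix xs i
        rw [← hedef] at hfx
        obtain ⟨fa', rfl⟩ : ∃ fa', fa = fa' + 1 := ⟨fa - 1, by omega⟩
        rw [loopA, if_pos (by omega), if_neg (by simp)]
        rw [if_neg (by
          simp only [Bool.and_eq_true, decide_eq_true_eq]
          intro h
          exact hfx ⟨h.1, h.2⟩)]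
        by_cases hb : pvBridge (chAt xs e) = true
        · rw [if_pos hb]
          have hnb : (nbList xs).getD (e+1) xs.length = pvPeek xs (e+1) :=
            nbList_getD xs (e+1) (by omega) xs.length
          by_cases hres : (decide (pvPeek xs (e+1) + 1 < xs.length)
              && decide (chAt xs (pvPeek xs (e+1)) = chAt xs (pvPeek xs (e+1) + 1))) = true
          · have hreg : regionB xs (nbList xs) (peList xs) (fr'+1) i acc
                = regionB xs (nbList xs) (peList xs) fr' (e+1)
                    ((acc ++ stride2 xs i e) ++ [chAt xs e]) := by
              simp only [regionB, hpe, hnb]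
              rw [if_neg (by omega), if_neg (by simp [hb]), if_neg (by simp [hres])]
            rw [hreg]
            show loopA xs fa' (e + 1)
                (decide (pvPeek xs (e+1) + 1 < xs.length)
                  && decide (chAt xs (pvPeek xs (e+1)) = chAt xs (pvPeek xs (e+1) + 1)))
                ((acc ++ stride2 xs i e) ++ [chAt xs e]) = _
            rw [hres]
            exact (ih (e+1) ((acc ++ stride2 xs i e) ++ [chAt xs e])).2
              (by omega) (by omega) fa' fr' fo (by omega) (by omega) (by omega)
          · have hres0 : (decide (pvPeek xs (e+1) + 1 < xs.length)
                && decide (chAt xs (pvPeek xs (e+1)) = chAt xs (pvPeek xs (e+1) + 1))) = false := by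
              simpa using hres
            have hreg : regionB xs (nbList xs) (peList xs) (fr'+1) i acc
                = (e + 1, (acc ++ stride2 xs i e) ++ [chAt xs e]) := by
              simp only [regionB, hpe, hnb]
              rw [if_neg (by omega), if_neg (by simp [hb]), if_pos (by simp [hres0])]
            rw [hreg]
            show loopA xs fa' (e + 1)
                (decide (pvPeek xs (e+1) + 1 < xs.length)
                  && decide (chAt xs (pvPeek xs (e+1)) = chAt xs (pvPeek xs (e+1) + 1)))
                ((acc ++ stride2 xs i e) ++ [chAt xs e]) = _
            rw [hres0]
            exact (ih (e+1) ((acc ++ stride2 xs i e) ++ [chAt xs e])).1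
              (by omega) fa' fo (by omega) (by omega)
        · have hb0 : pvBridge (chAt xs e) = false := Bool.not_eq_true _ |>.mp hb
          rw [if_neg hb]
          have hreg : regionB xs (nbList xs) (peList xs) (fr'+1) i acc
              = (e + 1, (acc ++ stride2 xs i e) ++ [chAt xs e]) := by
            simp only [regionB, hpe]
            rw [if_neg (by omega), if_pos (by simp [hb0])]
          rw [hreg]
          exact (ih (e+1) ((acc ++ stride2 xs i e) ++ [chAt xs e])).1
            (by omega) fa' fo (by omega) (by omega)

-- ===== VERDICT (by name: the statement is the Claim_ definition above) =====
theorem deduplicate_text_spec : Claim_equal_deduplicate_text := by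
  unfold Claim_equal_deduplicate_text Spec_deduplicate_text
  intro text _
  unfold deduplicate_text deduplicate_text_alt
  by_cases he : text = ""
  · subst he
    rfl
  · rw [if_neg he]
    rw [(mainSim text.toList (2 * text.toList.length + 1) 0 []).1 (by omega)
      (2 * text.toList.length + 1) (text.toList.length + 1) (by omega) (by omega)]
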